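-- pv_equiv track=rewrite | github.com/ncdbzb/normalize-data | classification.py | get_classes_v1
-- ===== SOURCE A (Python) =====
-- def get_classes_v1(records):
--     classification = {}
--
--     for record in records:
--         first_word = record.split()[0]
--
--         if first_word in classification:
--             classification[first_word].append(record)
--         else:
--             classification[first_word] = [record]
--
--     return classification
-- ===== SOURCE B (Python) =====
-- def get_classes_v1(records):
--     pairs = [(record.split()[0], record) for record in records]
--     classification = {}
--     while pairs:
--         first = pairs[0][0]
--         classification[first] = [record for key, record in pairs if key == first]
--         pairs = [(key, record) for key, record in pairs if key != first]
--     return classification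
-- ===== Notes on version B (the rewrite author's own statement) =====
-- stated objective: alternative
-- what changed: A makes one pass over the records, accumulating into a dict with a membership-test branch; B is a repeated-partition selection: it pairs each record with its first word once, then loops over DISTINCT keys, extracting the whole group of the first remaining key by filtering and dropping those pairs, so no dict accumulator or membership branch appears in the traversal.
import Mathlib
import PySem

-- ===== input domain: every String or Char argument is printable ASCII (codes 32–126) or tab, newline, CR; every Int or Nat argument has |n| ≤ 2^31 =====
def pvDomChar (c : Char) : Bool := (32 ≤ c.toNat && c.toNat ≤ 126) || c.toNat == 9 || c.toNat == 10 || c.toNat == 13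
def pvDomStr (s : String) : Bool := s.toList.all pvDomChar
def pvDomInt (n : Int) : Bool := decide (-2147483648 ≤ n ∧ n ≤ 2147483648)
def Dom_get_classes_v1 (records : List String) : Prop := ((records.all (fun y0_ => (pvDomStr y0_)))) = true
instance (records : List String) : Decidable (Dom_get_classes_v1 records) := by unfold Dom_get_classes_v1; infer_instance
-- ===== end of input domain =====

-- B replaces A's single accumulating pass by repeated-partition selection: pair each record with its
-- first word once, then loop over DISTINCT keys, extracting each whole group by filtering and dropping
-- those pairs; objective: alternative (no dict accumulator in the traversal), same return values.

-- ===== PORT A =====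
-- A: one pass, a dict accumulator with an 'in' branch; record.split()[0] ported as pyGetD … 0 ""
-- (exact under Pre_, which admits only records whose split() has a first element).
def get_classes_v1 (records : List String) : List (String × List String) :=
  (records.foldl (fun classification record =>
    let first_word := PySem.List.pyGetD (PySem.Str.split₀ record) 0 ""
    if classification.contains first_word then
      -- classification[first_word].append(record)
      classification.modify first_word [] (· ++ [record])
    else
      classification.insert first_word [record]) PySem.Dict.empty).items

-- ===== PORT B =====
-- B's while loop: while pairs: first = pairs[0][0]; classification[first] = [r for k,r in pairs
-- if k == first]; pairs = [(k,r) for k,r in pairs if k != first]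
def pvGoB (pairs : List (String × String)) (classification : PySem.Dict String (List String)) :
    PySem.Dict String (List String) :=
  match pairs with
  | [] => classification
  | p0 :: rest =>
    let first := p0.1
    pvGoB ((p0 :: rest).filter (fun p => p.1 != first))
      (classification.insert first (((p0 :: rest).filter (fun p => p.1 == first)).map Prod.snd))
termination_by pairs.length
decreasing_by
  simp only [List.filter_cons, bne_self_eq_false, List.length_cons]
  exact Nat.lt_succ_of_le (List.length_filter_le _ _)

def get_classes_v1_alt (records : List String) : List (String × List String) :=
  let pairs := records.map (fun record => (PySem.List.pyGetD (PySem.Str.split₀ record) 0 "", record))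
  (pvGoB pairs PySem.Dict.empty).items

-- ===== PRECONDITION & SPEC =====
-- Pre_ excludes exactly the inputs containing a record with no whitespace-separated word,
-- where Python A (record.split()[0]) raises IndexError; B raises there too.
def Pre_get_classes_v1 (records : List String) : Prop :=
  ∀ r ∈ records, PySem.Str.split₀ r ≠ []
instance (records : List String) : Decidable (Pre_get_classes_v1 records) := by
  unfold Pre_get_classes_v1; infer_instance
def pvWitness_get_classes_v1 : List String := ["apple pie", "banana", "apple tart", " banana\tsplit"]

def Spec_get_classes_v1 (records : List String) (out : List (String × List String)) : Prop := out = get_classes_v1_alt records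
instance (records : List String) (out : List (String × List String)) : Decidable (Spec_get_classes_v1 records out) := by unfold Spec_get_classes_v1; infer_instance

-- ===== CLAIM (what is proved, stated in full; the proofs are below) =====
def Claim_equal_get_classes_v1 : Prop := ∀ (records : List String), Dom_get_classes_v1 records → Pre_get_classes_v1 records → Spec_get_classes_v1 records (get_classes_v1 records)

-- ===== LEMMAS AND PROOFS =====

-- the shared key function, used by the proofs only
def pvKey (r : String) : String := PySem.List.pyGetD (PySem.Str.split₀ r) 0 ""

-- A's loop body is uniformly 'modify' (on a missing key, modify appends (k, [] ++ [r]))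
theorem pv_step_eq {κ ν : Type} [BEq κ] [LawfulBEq κ] (d : PySem.Dict κ (List ν)) (k : κ) (r : ν) :
    (if d.contains k then d.modify k [] (· ++ [r]) else d.insert k [r]) =
      d.modify k [] (· ++ [r]) := by
  by_cases h : d.contains k
  · simp [h]
  · simp only [Bool.not_eq_true] at h
    simp [h, PySem.Dict.modify, PySem.Dict.getD_of_not_contains _ _ h]

-- characterisation of A: distinct keys in first-appearance order, each with its filtered records
theorem pvA_char (records : List String) :
    get_classes_v1 records =
      (PySem.List.dedup (records.map pvKey)).map
        (fun k => (k, records.filter (fun r => pvKey r == k))) := by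
  unfold get_classes_v1
  have hbody : (fun (d : PySem.Dict String (List String)) (record : String) =>
      let first_word := PySem.List.pyGetD (PySem.Str.split₀ record) 0 ""
      if d.contains first_word then d.modify first_word [] (· ++ [record])
      else d.insert first_word [record]) =
      fun d record => d.modify (pvKey record) [] (· ++ [record]) := by
    funext d record
    simpa [pvKey] using pv_step_eq d (pvKey record) record
  rw [hbody]
  have hnd : (records.foldl (fun d record => d.modify (pvKey record) [] (· ++ [record]))
      PySem.Dict.empty).keys.Nodup :=
    PySem.Dict.nodup_keys_foldl_modify_key records pvKey []
      (fun _ record => (· ++ [record])) PySem.Dict.empty (by simp)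
  rw [PySem.Dict.items_eq_map_keys _ hnd []]
  have hkeys : (records.foldl (fun d record => d.modify (pvKey record) [] (· ++ [record]))
      PySem.Dict.empty).keys = PySem.Set.ofList (records.map pvKey) := by
    rw [PySem.Dict.keys_foldl_modify_key records pvKey []
      (fun _ record => (· ++ [record])) PySem.Dict.empty]
    simp [PySem.Set.update, PySem.Set.ofList]
  rw [hkeys, PySem.List.dedup_eq_ofList]
  refine List.map_congr_left (fun k hk => ?_)
  have hfold : records.foldl (fun d record => d.modify (pvKey record) [] (· ++ [record]))
      PySem.Dict.empty =
      (records.map (fun r => (pvKey r, r))).foldl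
        (fun d p => d.modify p.1 [] (· ++ [p.2])) PySem.Dict.empty := by
    rw [List.foldl_map]
  rw [hfold, PySem.Dict.getD_foldl_modify_append]
  simp [List.filter_map, Function.comp_def]

-- foldl of Set.add skips elements already present
theorem pv_foldl_add_skip (l : List String) (s : PySem.Set String) (x : String) (hx : x ∈ s) :
    l.foldl PySem.Set.add s = (l.filter (fun y => y ≠ x)).foldl PySem.Set.add s := by
  induction l generalizing s with
  | nil => rfl
  | cons y ys ih =>
    by_cases h : y = x
    · subst h
      have : PySem.Set.add s y = s := by simp [PySem.Set.add, hx]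
      simp [this, ih s hx]
    · have hx' : x ∈ PySem.Set.add s y := by
        simp [PySem.Set.add]; split <;> simp [hx]
      simp [h, ih _ hx']

-- foldl of Set.add from a seed whose head never recurs in the list commutes with cons
theorem pv_foldl_add_cons (l : List String) (s : List String) (x : String)
    (h : ∀ y ∈ l, y ≠ x) :
    l.foldl PySem.Set.add (x :: s) = x :: l.foldl PySem.Set.add s := by
  induction l generalizing s with
  | nil => rfl
  | cons y ys ih =>
    have hyx : y ≠ x := h y (by simp)
    have hstep : PySem.Set.add (x :: s) y = x :: PySem.Set.add s y := by
      simp [PySem.Set.add, PySem.Set.contains, hyx]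
      split <;> simp_all
    simp only [List.foldl_cons, hstep]
    exact ih _ (fun z hz => h z (by simp [hz]))

-- dedup of a cons: head, then dedup of the tail with the head's occurrences removed
theorem pv_dedup_cons_filter (x : String) (xs : List String) :
    PySem.List.dedup (x :: xs) = x :: PySem.List.dedup (xs.filter (fun y => y ≠ x)) := by
  have h0 : PySem.List.dedup (x :: xs) = xs.foldl PySem.Set.add [x] := by
    simp [PySem.List.dedup_eq_ofList, PySem.Set.ofList_eq_foldl, PySem.Set.add, PySem.Set.contains]
  rw [h0, pv_foldl_add_skip xs [x] x (by simp),
    pv_foldl_add_cons _ _ _ (fun y hy => by simpa using (List.mem_filter.mp hy).2)]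
  simp [PySem.List.dedup_eq_ofList, PySem.Set.ofList_eq_foldl]


-- invariant of B's loop: result items = old items ++ one group per distinct remaining key
theorem pvGoB_char (pairs : List (String × String)) (d : PySem.Dict String (List String))
    (hnd : d.keys.Nodup) (hfresh : ∀ k ∈ pairs.map Prod.fst, d.contains k = false) :
    (pvGoB pairs d).items =
      d.items ++ (PySem.List.dedup (pairs.map Prod.fst)).map
        (fun k => (k, ((pairs.filter (fun p => p.1 == k)).map Prod.snd))) := by
  induction pairs, d using pvGoB.induct with
  | case1 d => simp [pvGoB]
  | case2 cls p0 rest first =>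
    rename_i ih
    have hfirstmem : p0.1 ∈ (p0 :: rest).map Prod.fst := by simp
    have hfirst : cls.contains p0.1 = false := hfresh _ hfirstmem
    have hpairs' : (p0 :: rest).filter (fun p => p.1 != p0.1) =
        rest.filter (fun p => p.1 != p0.1) := by
      simp
    have hnd' : (cls.insert p0.1 (((p0 :: rest).filter (fun p => p.1 == p0.1)).map Prod.snd)).keys.Nodup :=
      PySem.Dict.nodup_keys_insert _ _ _ hnd
    have hfresh' : ∀ k ∈ ((p0 :: rest).filter (fun p => p.1 != p0.1)).map Prod.fst,
        (cls.insert p0.1 (((p0 :: rest).filter (fun p => p.1 == p0.1)).map Prod.snd)).contains k = false := by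
      intro k hk
      rcases List.mem_map.mp hk with ⟨p, hp, rfl⟩
      rcases List.mem_filter.mp hp with ⟨hpmem, hpne⟩
      have hne : p.1 ≠ p0.1 := by simpa using hpne
      rw [PySem.Dict.contains_insert]
      simp [hne, hfresh _ (List.mem_map.mpr ⟨p, hpmem, rfl⟩)]
    rw [show pvGoB (p0 :: rest) cls =
        pvGoB ((p0 :: rest).filter (fun p => p.1 != p0.1))
          (cls.insert p0.1 (((p0 :: rest).filter (fun p => p.1 == p0.1)).map Prod.snd)) from by
      rw [pvGoB]]
    rw [ih hnd' hfresh']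
    rw [PySem.Dict.items_insert_of_not_contains _ _ hfirst]
    -- keys of the filtered tail
    have hmapfst : ((p0 :: rest).filter (fun p => p.1 != p0.1)).map Prod.fst =
        ((p0 :: rest).map Prod.fst).filter (fun y => y ≠ p0.1) := by
      rw [List.filter_map]
      congr 1
      apply List.filter_congr
      intro p _
      rw [Bool.eq_iff_iff]
      simp [Function.comp]
    have hdedup : PySem.List.dedup ((p0 :: rest).map Prod.fst) =
        p0.1 :: PySem.List.dedup ((((p0 :: rest)).map Prod.fst).filter (fun y => y ≠ p0.1)) := by
      simp only [List.map_cons]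
      rw [pv_dedup_cons_filter]
      congr 2
      simp
    rw [show PySem.List.dedup (List.map Prod.fst (List.filter (fun p => p.1 != p0.1) (p0 :: rest))) =
        PySem.List.dedup (List.filter (fun y => decide (y ≠ p0.1)) (List.map Prod.fst (p0 :: rest))) from by rw [hmapfst]]
    rw [hdedup, List.map_cons, List.append_assoc, List.singleton_append]
    congr 1
    congr 1
    apply List.map_congr_left
    intro k hk
    have hkne : k ≠ p0.1 := by
      have hmem : k ∈ (List.map Prod.fst (p0 :: rest)).filter (fun y => decide (y ≠ p0.1)) := by
        simpa [PySem.List.mem_dedup] using hk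
      simpa using (List.mem_filter.mp hmem).2
    congr 1
    rw [List.filter_filter]
    apply congrArg
    apply List.filter_congr
    intro p _
    by_cases h : p.1 = k
    · simp only [h, bne, beq_self_eq_true, Bool.true_and]
      simpa using hkne
    · simp [h]

-- characterisation of B, same right-hand side as A's
theorem pvB_char (records : List String) :
    get_classes_v1_alt records =
      (PySem.List.dedup (records.map pvKey)).map
        (fun k => (k, records.filter (fun r => pvKey r == k))) := by
  unfold get_classes_v1_alt pvKey
  rw [pvGoB_char _ _ (by simp) (by intro k _; simp [PySem.Dict.contains_empty])]
  simp [List.map_map, List.filter_map, Function.comp_def, PySem.Dict.empty]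

-- ===== VERDICT (by name: the statement is the Claim_ definition above) =====
theorem get_classes_v1_spec : Claim_equal_get_classes_v1 := by
  intro records _ _
  unfold Spec_get_classes_v1
  rw [pvA_char, pvB_char]
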